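-- pv_equiv track=rewrite | github.com/Samfundet/Samfundet4 | backend/samfundet/utils/generate_optimal_interview_timeblocks.py | group_block_by_interviewer_count
-- ===== SOURCE A (Python) =====
-- def group_block_by_interviewer_count(available_persons_count):
--     grouped_blocks = {}
--     for date, blocks in available_persons_count.items():
--         current_count = blocks[0][2]
--         current_start = blocks[0][0]
--         grouped_blocks[date] = []
--         for i in range(1, len(blocks)):
--             start, end, count = blocks[i]
--             if count != current_count:
--                 grouped_blocks[date].append((current_start, blocks[-1][1], current_count))
--                 current_start = start
--                 current_count = count
--         grouped_blocks[date].append((current_start, blocks[-1][1], current_count))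
--     return grouped_blocks
-- ===== SOURCE B (Python) =====
-- def _runs(blocks):
--     # Divide and conquer: runs of the two halves, merged at the boundary
--     # when the adjoining runs carry the same interviewer count.
--     if len(blocks) <= 1:
--         return [(b[0], b[2]) for b in blocks]
--     mid = len(blocks) // 2
--     left = _runs(blocks[:mid])
--     right = _runs(blocks[mid:])
--     if left and right and left[-1][1] == right[0][1]:
--         return left + right[1:]
--     return left + right
--
--
-- def group_block_by_interviewer_count(available_persons_count):
--     grouped_blocks = {}
--     for date, blocks in available_persons_count.items():
--         last_end = blocks[-1][1]
--         grouped_blocks[date] = [(s, last_end, c) for s, c in _runs(blocks)]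
--     return grouped_blocks
-- ===== Notes on version B (the rewrite author's own statement) =====
-- stated objective: alternative
-- what changed: Replaces A's stateful left-to-right scan (current_start/current_count with an emit-on-change branch) by a recursive divide-and-conquer: split the block list in half, compute the (start,count) runs of each half recursively, and merge the two run lists, fusing the boundary runs when they carry the same count; Pre_ excludes dates with an empty block list, where both A (blocks[0]) and B (blocks[-1]) raise IndexError.
import Mathlib
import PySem

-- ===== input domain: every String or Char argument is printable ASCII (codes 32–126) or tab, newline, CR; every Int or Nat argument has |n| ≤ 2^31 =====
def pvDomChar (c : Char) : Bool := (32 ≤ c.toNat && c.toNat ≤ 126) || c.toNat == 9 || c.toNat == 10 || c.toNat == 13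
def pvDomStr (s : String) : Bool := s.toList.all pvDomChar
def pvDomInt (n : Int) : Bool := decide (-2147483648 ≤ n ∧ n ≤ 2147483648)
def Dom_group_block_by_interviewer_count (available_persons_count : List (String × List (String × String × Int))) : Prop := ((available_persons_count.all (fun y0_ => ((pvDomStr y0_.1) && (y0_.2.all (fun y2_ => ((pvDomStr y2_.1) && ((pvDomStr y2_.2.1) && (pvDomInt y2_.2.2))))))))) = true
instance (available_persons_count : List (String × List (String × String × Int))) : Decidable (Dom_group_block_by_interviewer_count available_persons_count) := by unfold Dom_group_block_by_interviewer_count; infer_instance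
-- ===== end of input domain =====

-- B replaces A's stateful left-to-right scan by a recursive divide-and-conquer on the block
-- list (halve, recurse, merge boundary runs of equal count); equivalence of the RETURN value
-- on dicts with no empty block list (objective: alternative, same result, no speed claim).

-- ===== PORT A =====
-- A's inner 'for i in range(1, len(blocks))' with current_start/current_count and
-- in-place appends to grouped_blocks[date], as structural recursion over the tail.
def pvALoop (lastEnd cs : String) (cc : Int) (acc : List (String × String × Int)) :
    List (String × String × Int) → List (String × String × Int)
  | [] => acc ++ [(cs, lastEnd, cc)]
  | (s, _, c) :: rest =>
    if c ≠ cc then pvALoop lastEnd s c (acc ++ [(cs, lastEnd, cc)]) rest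
    else pvALoop lastEnd cs cc acc rest

def pvADate (blocks : List (String × String × Int)) : List (String × String × Int) :=
  match PySem.List.pyGet? blocks 0, PySem.List.pyGet? blocks (-1) with
  | some b0, some bl => pvALoop bl.2.1 b0.1 b0.2.2 [] (blocks.drop 1)
  | _, _ => []   -- Python raises IndexError here (empty blocks); excluded by Pre_

def group_block_by_interviewer_count (available_persons_count : List (String × List (String × String × Int))) : List (String × List (String × String × Int)) :=
  (available_persons_count.foldl
    (fun d (p : String × List (String × String × Int)) => PySem.Dict.insert d p.1 (pvADate p.2))
    PySem.Dict.empty).items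

-- ===== PORT B =====
-- Source B's boundary merge: 'if left and right and left[-1][1] == right[0][1]: left + right[1:]'.
def pvMerge (L R : List (String × Int)) : List (String × Int) :=
  match L.getLast?, R with
  | some l, r :: rt => if l.2 == r.2 then L ++ rt else L ++ R
  | _, _ => L ++ R

-- Source B's _runs: halve the list, recurse on each half, merge.
def pvRunsDC (blocks : List (String × String × Int)) : List (String × Int) :=
  if blocks.length ≤ 1 then blocks.map (fun b => (b.1, b.2.2))
  else pvMerge (pvRunsDC (blocks.take (blocks.length / 2)))
               (pvRunsDC (blocks.drop (blocks.length / 2)))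
termination_by blocks.length
decreasing_by
  · simp; omega
  · simp; omega

def pvBDate (blocks : List (String × String × Int)) : List (String × String × Int) :=
  match PySem.List.pyGet? blocks (-1) with
  | none => []   -- Python raises IndexError here (empty blocks); excluded by Pre_
  | some bl => (pvRunsDC blocks).map (fun q => (q.1, bl.2.1, q.2))

def group_block_by_interviewer_count_alt (available_persons_count : List (String × List (String × String × Int))) : List (String × List (String × String × Int)) :=
  (available_persons_count.foldl
    (fun d (p : String × List (String × String × Int)) => PySem.Dict.insert d p.1 (pvBDate p.2))
    PySem.Dict.empty).items

-- ===== PRECONDITION & SPEC =====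
-- Pre_ excludes dates whose block list is empty: there A (blocks[0]) and B (blocks[-1]) raise IndexError.
def Pre_group_block_by_interviewer_count (available_persons_count : List (String × List (String × String × Int))) : Prop :=
  ∀ p ∈ available_persons_count, p.2 ≠ []
instance (available_persons_count : List (String × List (String × String × Int))) : Decidable (Pre_group_block_by_interviewer_count available_persons_count) := by unfold Pre_group_block_by_interviewer_count; infer_instance

def pvWitness_group_block_by_interviewer_count : (List (String × List (String × String × Int))) :=
  [("2024-01-01", [("10:00", "10:30", 2), ("10:30", "11:00", 2), ("11:00", "11:30", 3)]),
   ("2024-01-02", [("09:00", "09:30", 1)])]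

def Spec_group_block_by_interviewer_count (available_persons_count : List (String × List (String × String × Int))) (out : List (String × List (String × String × Int))) : Prop := out = group_block_by_interviewer_count_alt available_persons_count
instance (available_persons_count : List (String × List (String × String × Int))) (out : List (String × List (String × String × Int))) : Decidable (Spec_group_block_by_interviewer_count available_persons_count out) := by unfold Spec_group_block_by_interviewer_count; infer_instance

-- ===== CLAIM (what is proved, stated in full; the proofs are below) =====
def Claim_equal_group_block_by_interviewer_count : Prop := ∀ (available_persons_count : List (String × List (String × String × Int))), Dom_group_block_by_interviewer_count available_persons_count → Pre_group_block_by_interviewer_count available_persons_count → Spec_group_block_by_interviewer_count available_persons_count (group_block_by_interviewer_count available_persons_count)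

-- ===== LEMMAS AND PROOFS =====

-- Runs of the tail, given the count `prev` of the preceding block (mirrors A's scan).
def pvRuns (prev : Int) : List (String × String × Int) → List (String × Int)
  | [] => []
  | (s, _, c) :: rest => if c ≠ prev then (s, c) :: pvRuns c rest else pvRuns prev rest

-- Runs of a whole list.
def pvRuns2 : List (String × String × Int) → List (String × Int)
  | [] => []
  | (s, _, c) :: rest => (s, c) :: pvRuns c rest

-- the count of the last run, or `prev` if there is none
def pvLastC (prev : Int) (L : List (String × Int)) : Int := (L.getLast?.map Prod.snd).getD prev

theorem pvLastC_cons (p : Int) (x : String × Int) (M : List (String × Int)) :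
    pvLastC p (x :: M) = pvLastC x.2 M := by
  cases M with
  | nil => simp [pvLastC]
  | cons y t =>
    obtain ⟨g, hg⟩ : ∃ g, (y :: t).getLast? = some g :=
      ⟨_, List.getLast?_eq_some_getLast (by simp)⟩
    simp [pvLastC, List.getLast?_cons_cons, hg]

theorem pvALoop_eq (le : String) :
    ∀ (l : List (String × String × Int)) (cs : String) (cc : Int) (acc : List (String × String × Int)),
      pvALoop le cs cc acc l = acc ++ (cs, le, cc) :: (pvRuns cc l).map (fun q => (q.1, le, q.2))
  | [], cs, cc, acc => by simp [pvALoop, pvRuns]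
  | (s, e, c) :: rest, cs, cc, acc => by
    by_cases h : c = cc
    · simp [pvALoop, pvRuns, h, pvALoop_eq le rest cs cc acc]
    · simp [pvALoop, pvRuns, h, pvALoop_eq le rest s c (acc ++ [(cs, le, cc)])]

theorem pvRuns_append :
    ∀ (l : List (String × String × Int)) (prev : Int) (r : List (String × String × Int)),
      pvRuns prev (l ++ r) = pvRuns prev l ++ pvRuns (pvLastC prev (pvRuns prev l)) r
  | [], prev, r => by simp [pvRuns, pvLastC]
  | (s, e, c) :: l', prev, r => by
    by_cases h : c = prev
    · simp [pvRuns, h, pvRuns_append l' prev r]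
    · simp [pvRuns, h, pvRuns_append l' c r, pvLastC_cons]

theorem pvRuns2_last (b : String × String × Int) (l' : List (String × String × Int)) (d : Int) :
    pvLastC d (pvRuns2 (b :: l')) = pvLastC b.2.2 (pvRuns b.2.2 l') := by
  obtain ⟨s, e, c⟩ := b
  show pvLastC d ((s, c) :: pvRuns c l') = _
  rw [pvLastC_cons]

theorem pvMerge_runs2 (l r : List (String × String × Int)) :
    pvRuns2 (l ++ r) = pvMerge (pvRuns2 l) (pvRuns2 r) := by
  cases l with
  | nil => rw [List.nil_append]; cases hr : pvRuns2 r <;> rfl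
  | cons b l' =>
    obtain ⟨bs, be, bc⟩ := b
    have hL : pvRuns2 ((bs, be, bc) :: l') = (bs, bc) :: pvRuns bc l' := rfl
    obtain ⟨g, hg⟩ : ∃ g, ((bs, bc) :: pvRuns bc l').getLast? = some g :=
      ⟨_, List.getLast?_eq_some_getLast (by simp)⟩
    cases r with
    | nil => rw [List.append_nil, hL]; simp [pvMerge, pvRuns2, hg]
    | cons rb r' =>
      obtain ⟨rs, re, rc⟩ := rb
      set c' := pvLastC bc (pvRuns bc l') with hc'
      have hg2 : g.2 = c' := by
        rw [hc', ← pvRuns2_last (bs, be, bc) l' bc, hL]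
        simp [pvLastC, hg]
      have hlhs : pvRuns2 (((bs, be, bc) :: l') ++ (rs, re, rc) :: r')
          = (bs, bc) :: (pvRuns bc l' ++ pvRuns c' ((rs, re, rc) :: r')) := by
        simp only [List.cons_append, pvRuns2, pvRuns_append, ← hc']
      rw [hlhs, hL]
      by_cases h : rc = c'
      · subst h
        simp [pvMerge, hg, hg2, pvRuns, pvRuns2]
      · have h' : ¬ (g.2 = rc) := by rw [hg2]; exact fun hx => h hx.symm
        simp [pvMerge, hg, h', pvRuns, pvRuns2, h]

theorem pvRunsDC_eq (l : List (String × String × Int)) : pvRunsDC l = pvRuns2 l := by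
  rw [pvRunsDC]
  split
  · rename_i h
    match l, h with
    | [], _ => simp [pvRuns2]
    | [b], _ => simp [pvRuns2, pvRuns]
  · rename_i h
    rw [pvRunsDC_eq, pvRunsDC_eq, ← pvMerge_runs2, List.take_append_drop]
termination_by l.length
decreasing_by
  · simp; omega
  · simp; omega

theorem pvDate_eq (blocks : List (String × String × Int)) (h : blocks ≠ []) :
    pvADate blocks = pvBDate blocks := by
  obtain ⟨b0, rest, rfl⟩ := List.exists_cons_of_ne_nil h
  have hlast : PySem.List.pyGet? (b0 :: rest) (-1) = (b0 :: rest).getLast? :=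
    PySem.List.pyGet?_neg_one _
  obtain ⟨bl, hbl⟩ : ∃ bl, (b0 :: rest).getLast? = some bl :=
    ⟨_, List.getLast?_eq_some_getLast (by simp)⟩
  simp only [pvADate, pvBDate, hlast, hbl, PySem.List.pyGet?_zero_cons, List.drop_succ_cons,
    List.drop_zero]
  rw [pvALoop_eq, pvRunsDC_eq]
  obtain ⟨s, e, c⟩ := b0
  simp [pvRuns2]

-- ===== VERDICT (by name: the statement is the Claim_ definition above) =====
theorem group_block_by_interviewer_count_spec : Claim_equal_group_block_by_interviewer_count := by
  intro l _ hpre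
  unfold Spec_group_block_by_interviewer_count group_block_by_interviewer_count group_block_by_interviewer_count_alt
  rw [PySem.List.foldl_congr_mem]
  intro acc p hp
  rw [pvDate_eq p.2 (hpre p hp)]
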